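-- pv_equiv track=rewrite | github.com/ShubhamSinghal12/PythonDSAClassroomApril2022 | Lec11/PlayingWithgoodStrings.py | pwgs
-- ===== SOURCE A (Python) =====
-- def isVowel(st):
--     return st in "aeiou"
--
-- def pwgs(st):
--     ct = 0
--     maxct = 0
--     for i in range(len(st)):
--         if isVowel(st[i]):
--             ct += 1
--         else:
--             ct = 0
--
--         if maxct < ct:
--             maxct = ct
--
--     return maxct
-- ===== SOURCE B (Python) =====
-- def pwgs(st):
--     # group the string into maximal runs of (is-vowel, length), then take the
--     # largest vowel-run length (0 when there is none)
--     runs = []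
--     for c in st:
--         k = c in "aeiou"
--         if runs and runs[-1][0] == k:
--             runs[-1][1] += 1
--         else:
--             runs.append([k, 1])
--     return max((n for k, n in runs if k), default=0)
-- ===== Notes on version B (the rewrite author's own statement) =====
-- stated objective: alternative
-- what changed: Replaces A's running-counter/running-max flat scan with a group-then-measure decomposition: build the list of maximal same-key runs, then take the max length among vowel runs (default 0).
import Mathlib
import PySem

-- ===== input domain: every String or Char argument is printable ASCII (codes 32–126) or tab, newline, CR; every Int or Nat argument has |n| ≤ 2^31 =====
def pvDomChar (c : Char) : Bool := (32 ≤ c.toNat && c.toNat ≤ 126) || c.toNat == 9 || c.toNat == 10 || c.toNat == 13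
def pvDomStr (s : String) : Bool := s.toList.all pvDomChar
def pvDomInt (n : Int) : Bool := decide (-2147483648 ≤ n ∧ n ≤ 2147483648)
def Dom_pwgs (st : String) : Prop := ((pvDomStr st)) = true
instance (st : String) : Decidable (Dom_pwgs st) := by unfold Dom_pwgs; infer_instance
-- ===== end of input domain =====

-- B replaces A's running-counter/running-max flat scan with a group-then-measure
-- decomposition (maximal runs, then max vowel-run length); same O(n) cost.


-- ===== PORT A =====
-- helper isVowel: `st in "aeiou"` on a single character
def isVowel (c : Char) : Bool := "aeiou".toList.contains c

-- loop body: ct += 1 / ct = 0, then if maxct < ct: maxct = ct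
def pwgsStep (s : Int × Int) (c : Char) : Int × Int :=
  let ct := if isVowel c then s.1 + 1 else 0
  (ct, if s.2 < ct then ct else s.2)

-- the for-loop over range(len(st)) reading st[i] visits the characters in order
def pwgs (st : String) : Int := (st.toList.foldl pwgsStep (0, 0)).2

-- ===== PORT B =====
-- one loop step of B: extend the last run or start a new one
-- (runs kept head-first, i.e. reversed; Python appends at the end)
def runStep (runs : List (Bool × Int)) (c : Char) : List (Bool × Int) :=
  let k := "aeiou".toList.contains c
  match runs with
  | (k', n) :: rest => if k' == k then (k', n + 1) :: rest else (k, 1) :: (k', n) :: rest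
  | [] => [(k, 1)]

-- max((n for k, n in runs if k), default=0); run lengths are ≥ 1, so folding max from 0 is exact
def pwgs_alt (st : String) : Int :=
  ((st.toList.foldl runStep []).reverse).foldl (fun m p => if p.1 then max m p.2 else m) 0

-- ===== PRECONDITION & SPEC =====
def Spec_pwgs (st : String) (out : Int) : Prop := out = pwgs_alt st
instance (st : String) (out : Int) : Decidable (Spec_pwgs st out) := by unfold Spec_pwgs; infer_instance

-- ===== CLAIM (what is proved, stated in full; the proofs are below) =====
def Claim_equal_pwgs : Prop := ∀ (st : String), Dom_pwgs st → Spec_pwgs st (pwgs st)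

-- ===== LEMMAS AND PROOFS =====

-- order-independent value of a run list (head-first): max vowel-run length
def mbVal : List (Bool × Int) → Int
  | [] => 0
  | (k, n) :: t => if k then max n (mbVal t) else mbVal t

-- the current counter A keeps equals the length of the run at the head (if it is a vowel run)
def headCt : List (Bool × Int) → Int
  | (true, n) :: _ => n
  | _ => 0

lemma mbVal_nonneg : ∀ rs : List (Bool × Int), 0 ≤ mbVal rs := by
  intro rs
  induction rs with
  | nil => simp [mbVal]
  | cons p t ih =>
    obtain ⟨k, n⟩ := p
    cases k <;> simp [mbVal] <;> omega

-- B's left fold over the reversed run list computes mbVal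
lemma bfold_reverse (rs : List (Bool × Int)) :
    (rs.reverse).foldl (fun m p => if p.1 then max m p.2 else m) 0 = mbVal rs := by
  induction rs with
  | nil => simp [mbVal]
  | cons p t ih =>
    obtain ⟨k, n⟩ := p
    cases k <;> simp [List.foldl_append, mbVal, ih, max_comm]

-- loop invariant: A's state (ct, maxct) is determined by B's run list
lemma inv_fold : ∀ (l : List Char) (ct m : Int) (runs : List (Bool × Int)),
    m = mbVal runs → ct = headCt runs → 0 ≤ m →
    (l.foldl pwgsStep (ct, m)).2 = mbVal (l.foldl runStep runs) := by
  intro l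
  induction l with
  | nil => intro ct m runs hm _ _; simpa using hm
  | cons c t ih =>
    intro ct m runs hm hct hm0
    rw [List.foldl_cons, List.foldl_cons]
    cases hv : "aeiou".toList.contains c with
    | true =>
      have hA : pwgsStep (ct, m) c = (ct + 1, if m < ct + 1 then ct + 1 else m) := by
        simp only [pwgsStep, isVowel, hv, if_true]
      match runs with
      | (true, n) :: rest =>
        have hB : runStep ((true, n) :: rest) c = (true, n + 1) :: rest := by
          simp only [runStep]; rw [hv]; simp
        simp only [headCt] at hct
        simp only [mbVal, if_true] at hm
        rw [hA, hB]
        apply ih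
        · have := mbVal_nonneg rest
          simp only [mbVal, if_true]
          omega
        · simp [headCt, hct]
        · omega
      | (false, n) :: rest =>
        have hB : runStep ((false, n) :: rest) c = (true, 1) :: (false, n) :: rest := by
          simp only [runStep]; rw [hv]; simp
        simp only [headCt] at hct
        simp only [mbVal, if_false, Bool.false_eq_true] at hm
        rw [hA, hB]
        apply ih
        · simp only [mbVal, if_true, if_false, Bool.false_eq_true]
          omega
        · simp [headCt, hct]
        · omega
      | [] =>
        have hB : runStep [] c = [(true, 1)] := by simp only [runStep]; rw [hv]
        simp only [headCt] at hct
        simp only [mbVal] at hm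
        rw [hA, hB]
        apply ih
        · simp only [mbVal, if_true]
          omega
        · simp [headCt, hct]
        · omega
    | false =>
      have hA : pwgsStep (ct, m) c = (0, if m < 0 then 0 else m) := by
        simp only [pwgsStep, isVowel, hv, Bool.false_eq_true, if_false]
      have hA' : pwgsStep (ct, m) c = (0, m) := by rw [hA]; congr 1; omega
      match runs with
      | (false, n) :: rest =>
        have hB : runStep ((false, n) :: rest) c = (false, n + 1) :: rest := by
          simp only [runStep]; rw [hv]; simp
        rw [hA', hB]
        apply ih
        · simpa [mbVal] using hm
        · simp [headCt]
        · exact hm0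
      | (true, n) :: rest =>
        have hB : runStep ((true, n) :: rest) c = (false, 1) :: (true, n) :: rest := by
          simp only [runStep]; rw [hv]; simp
        rw [hA', hB]
        apply ih
        · simpa [mbVal] using hm
        · simp [headCt]
        · exact hm0
      | [] =>
        have hB : runStep [] c = [(false, 1)] := by simp only [runStep]; rw [hv]
        rw [hA', hB]
        apply ih
        · simpa [mbVal] using hm
        · simp [headCt]
        · exact hm0

-- ===== VERDICT (by name: the statement is the Claim_ definition above) =====
theorem pwgs_spec : Claim_equal_pwgs := by
  intro st _
  unfold Spec_pwgs pwgs pwgs_alt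
  rw [bfold_reverse]
  exact inv_fold st.toList 0 0 [] rfl rfl le_rfl
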